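-- pv_equiv track=rewrite | github.com/CS4091/Team_R_REPO | capstone2-clientapi/simple_alg.py | get_sensor_footprint
-- ===== SOURCE A (Python) =====
-- ORIENTATIONS = ["UP", "RIGHT", "DOWN", "LEFT"]
--
-- def get_sensor_footprint(position, orientation):
--     """
--     Given the aircraft's position (row, col) and orientation, compute the sensor footprint.
--     The sensor covers a 2x3 rectangle ahead of the aircraft.
--     We assume the sensor rectangle is placed immediately in front of the aircraft.
--     """
--     row, col = position
--     footprint = []
--     # Relative coordinates for a 2x3 rectangle with the aircraft at the bottom center when facing North.
--     # We'll define it for the North orientation and then rotate for other directions.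
--     # For North: rectangle is two rows high, three columns wide, in front of the aircraft.
--     rel_coords = [(-1, -1), (-1, 0), (-1, 1),
--                   (-2, -1), (-2, 0), (-2, 1)]
--
--     # Rotate relative coordinates based on orientation
--     def rotate(coord, orientation):
--         r, c = coord
--         # 90 degrees clockwise rotation
--         for _ in range(ORIENTATIONS.index(orientation)):
--             r, c = c, -r
--         return (r, c)
--
--     for rel in rel_coords:
--         dr, dc = rotate(rel, orientation)
--         footprint.append((row + dr, col + dc))
--     return footprint
-- ===== SOURCE B (Python) =====
-- ORIENTATIONS = ["UP", "RIGHT", "DOWN", "LEFT"]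
--
-- def get_sensor_footprint(position, orientation):
--     """Closed-form rotation by k quarter-turns instead of an iterative rotation loop."""
--     row, col = position
--     k = ORIENTATIONS.index(orientation)  # ValueError on unknown orientation, as before
--     rel_coords = [(-1, -1), (-1, 0), (-1, 1),
--                   (-2, -1), (-2, 0), (-2, 1)]
--     if k == 0:
--         rot = lambda r, c: (r, c)
--     elif k == 1:
--         rot = lambda r, c: (c, -r)
--     elif k == 2:
--         rot = lambda r, c: (-r, -c)
--     else:
--         rot = lambda r, c: (-c, r)
--     return [(row + dr, col + dc) for dr, dc in (rot(r, c) for r, c in rel_coords)]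
-- ===== Notes on version B (the rewrite author's own statement) =====
-- stated objective: simpler
-- what changed: Replaces the per-coordinate iterative 90-degree rotation loop (repeated k times per point) with a single closed-form quarter-turn transform selected once from k = ORIENTATIONS.index(orientation), applied in one comprehension.
import Mathlib
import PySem

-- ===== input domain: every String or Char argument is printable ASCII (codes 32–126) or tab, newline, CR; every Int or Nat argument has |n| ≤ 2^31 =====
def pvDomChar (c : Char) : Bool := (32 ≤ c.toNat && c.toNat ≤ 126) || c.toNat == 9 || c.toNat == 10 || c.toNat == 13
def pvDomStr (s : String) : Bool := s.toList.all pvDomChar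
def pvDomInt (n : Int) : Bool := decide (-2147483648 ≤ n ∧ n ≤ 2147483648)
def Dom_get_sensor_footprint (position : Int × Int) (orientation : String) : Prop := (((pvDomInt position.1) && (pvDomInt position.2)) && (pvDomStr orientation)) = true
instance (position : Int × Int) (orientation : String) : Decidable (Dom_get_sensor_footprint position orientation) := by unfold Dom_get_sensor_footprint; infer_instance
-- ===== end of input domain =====

-- B replaces A's per-coordinate iterative rotation loop with a single closed-form quarter-turn
-- transform picked once from the orientation index (objective: simpler).

-- ===== PORT A =====
def pvOrientations : List String := ["UP", "RIGHT", "DOWN", "LEFT"]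

-- A's inner 'rotate': repeat (r, c) := (c, -r) index-many times; none = ValueError (unknown orientation)
def pvRotateA (coord : Int × Int) (orientation : String) : Option (Int × Int) :=
  match PySem.List.index? pvOrientations orientation with
  | none => none
  | some k => some ((List.range k).foldl (fun rc _ => (rc.2, -rc.1)) coord)

def get_sensor_footprint (position : Int × Int) (orientation : String) : List (Int × Int) :=
  let row := position.1
  let col := position.2
  let rel_coords : List (Int × Int) := [(-1, -1), (-1, 0), (-1, 1), (-2, -1), (-2, 0), (-2, 1)]
  rel_coords.foldl (fun footprint rel =>
    match pvRotateA rel orientation with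
    | none => footprint          -- unreachable under Pre_ (Python raises ValueError here)
    | some d => footprint ++ [(row + d.1, col + d.2)]) []

-- ===== PORT B =====
def get_sensor_footprint_alt (position : Int × Int) (orientation : String) : List (Int × Int) :=
  let row := position.1
  let col := position.2
  let rel_coords : List (Int × Int) := [(-1, -1), (-1, 0), (-1, 1), (-2, -1), (-2, 0), (-2, 1)]
  match PySem.List.index? pvOrientations orientation with
  | none => []                   -- unreachable under Pre_ (Python raises ValueError here)
  | some k =>
    let rot : Int → Int → Int × Int :=
      if k == 0 then fun r c => (r, c)
      else if k == 1 then fun r c => (c, -r)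
      else if k == 2 then fun r c => (-r, -c)
      else fun r c => (-c, r)
    (rel_coords.map (fun rc => rot rc.1 rc.2)).map (fun d => (row + d.1, col + d.2))

-- ===== PRECONDITION & SPEC =====
-- Pre_ excludes exactly the orientations not in ORIENTATIONS, where Python A raises ValueError.
def Pre_get_sensor_footprint (position : Int × Int) (orientation : String) : Prop :=
  orientation = "UP" ∨ orientation = "RIGHT" ∨ orientation = "DOWN" ∨ orientation = "LEFT"
instance (position : Int × Int) (orientation : String) : Decidable (Pre_get_sensor_footprint position orientation) := by
  unfold Pre_get_sensor_footprint; infer_instance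

def pvWitness_get_sensor_footprint : (Int × Int) × String := ((2, 3), "RIGHT")

def Spec_get_sensor_footprint (position : Int × Int) (orientation : String) (out : List (Int × Int)) : Prop := out = get_sensor_footprint_alt position orientation
instance (position : Int × Int) (orientation : String) (out : List (Int × Int)) : Decidable (Spec_get_sensor_footprint position orientation out) := by unfold Spec_get_sensor_footprint; infer_instance

-- ===== CLAIM (what is proved, stated in full; the proofs are below) =====
def Claim_equal_get_sensor_footprint : Prop := ∀ (position : Int × Int) (orientation : String), Dom_get_sensor_footprint position orientation → Pre_get_sensor_footprint position orientation → Spec_get_sensor_footprint position orientation (get_sensor_footprint position orientation)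

-- ===== LEMMAS AND PROOFS =====

-- ===== VERDICT (by name: the statement is the Claim_ definition above) =====
theorem get_sensor_footprint_spec : Claim_equal_get_sensor_footprint := by
  intro position orientation _ hpre
  unfold Spec_get_sensor_footprint
  rcases hpre with h | h | h | h <;> subst h <;> rfl
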